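-- pv_equiv track=rewrite | github.com/wmp43/Data-Science-Search-Engine | src/text_processor.py | remove_curly_brackets
-- ===== SOURCE A (Python) =====
-- from typing import List, Dict, Any, Optional, Tuple
--
-- def remove_curly_brackets(section_dict) -> Dict:
--     cleaned_sections = {}
--
--     for section, text in section_dict.items():
--         stack = []
--         to_remove = []
--         text_list = list(text)
--
--         for i, char in enumerate(text_list):
--             if char == '{':
--                 stack.append(i)
--             elif char == '}':
--                 if stack:
--                     start = stack.pop()
--                     if not stack:
--                         to_remove.append((start, i))
--
--         for start, end in reversed(to_remove):
--             del text_list[start:end + 1]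
--
--         cleaned_sections[section] = ''.join(text_list)
--
--     return cleaned_sections
-- ===== SOURCE B (Python) =====
-- def remove_curly_brackets(section_dict):
--     cleaned_sections = {}
--     for section, text in section_dict.items():
--         depth = 0
--         top = 0       # start index of the current top-level '{' group
--         prev = 0      # end of the last removed group (exclusive)
--         pieces = []
--         for i, ch in enumerate(text):
--             if ch == '{':
--                 if depth == 0:
--                     top = i
--                 depth += 1
--             elif ch == '}':
--                 if depth:
--                     depth -= 1
--                     if depth == 0:
--                         pieces.append(text[prev:top])
--                         prev = i + 1
--         pieces.append(text[prev:])
--         cleaned_sections[section] = ''.join(pieces)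
--     return cleaned_sections
-- ===== Notes on version B (the rewrite author's own statement) =====
-- stated objective: alternative
-- what changed: A scans each string with a stack of indices to collect the top-level {...} ranges and then deletes them one by one with repeated list slicing; B makes a single left-to-right pass with a depth counter, emitting each kept piece exactly once and joining them at the end.
import Mathlib
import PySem

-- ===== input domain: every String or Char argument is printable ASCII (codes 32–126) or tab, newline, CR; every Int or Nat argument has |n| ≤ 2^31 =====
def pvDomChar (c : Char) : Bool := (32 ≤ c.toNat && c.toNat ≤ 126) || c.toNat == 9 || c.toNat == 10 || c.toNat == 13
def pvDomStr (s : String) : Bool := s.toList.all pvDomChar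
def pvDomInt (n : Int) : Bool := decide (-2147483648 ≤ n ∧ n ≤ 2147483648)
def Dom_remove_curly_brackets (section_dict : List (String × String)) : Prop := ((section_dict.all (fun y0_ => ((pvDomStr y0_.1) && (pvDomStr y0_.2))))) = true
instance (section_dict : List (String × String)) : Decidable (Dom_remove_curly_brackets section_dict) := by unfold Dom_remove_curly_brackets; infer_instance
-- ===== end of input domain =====

-- B replaces A's index-stack scan followed by repeated slice deletions by a single
-- left-to-right pass with a depth counter that emits each kept piece once (alternative algorithm).

-- ===== PORT A =====
-- loop body of A's scan over enumerate(text): state = (stack, to_remove)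
def pvStepA (s : List Int × List (Int × Int)) (p : Int × Char) : List Int × List (Int × Int) :=
  if p.2 = '{' then (s.1 ++ [p.1], s.2)                        -- stack.append(i)
  else if p.2 = '}' then
    if s.1 ≠ [] then                                           -- if stack:
      -- stack.pop() on a nonempty list = (getLast!, dropLast): exact
      (s.1.dropLast, if s.1.dropLast = [] then s.2 ++ [(s.1.getLast!, p.1)] else s.2)
    else s
  else s

-- A's per-string body (the inside of the 'for section, text' loop)
def pvCleanA (text : String) : String :=
  let textList := text.toList
  let scanned := (PySem.List.enumerate textList 0).foldl pvStepA ([], [])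
  -- 'del text_list[start:end+1]' = text_list[:start] + text_list[end+1:] (exact: the slice is deleted in place)
  let cleaned := scanned.2.reverse.foldl
      (fun tl se => PySem.List.slice tl none (some se.1) ++ PySem.List.slice tl (some (se.2 + 1)) none) textList
  String.ofList cleaned

def remove_curly_brackets (section_dict : List (String × String)) : List (String × String) :=
  (section_dict.foldl (fun d p => PySem.Dict.insert d p.1 (pvCleanA p.2)) PySem.Dict.empty).items

-- ===== PORT B =====
-- loop body of B's single pass: state = (depth, top, prev, pieces)
def pvStepB (cs : List Char) (s : Int × Int × Int × List (List Char)) (p : Int × Char) : Int × Int × Int × List (List Char) :=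
  if p.2 = '{' then
    (s.1 + 1, if s.1 = 0 then p.1 else s.2.1, s.2.2.1, s.2.2.2)
  else if p.2 = '}' then
    if s.1 ≠ 0 then                                            -- if depth:
      if s.1 - 1 = 0 then                                      -- depth -= 1; if depth == 0:
        (s.1 - 1, s.2.1, p.1 + 1, s.2.2.2 ++ [PySem.List.slice cs (some s.2.2.1) (some s.2.1)])
      else (s.1 - 1, s.2.1, s.2.2.1, s.2.2.2)
    else s
  else s

-- B's per-string body
def pvCleanB (text : String) : String :=
  let cs := text.toList
  let st := (PySem.List.enumerate cs 0).foldl (pvStepB cs) (0, 0, 0, [])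
  String.ofList ((st.2.2.2 ++ [PySem.List.slice cs (some st.2.2.1) none]).flatten)

def remove_curly_brackets_alt (section_dict : List (String × String)) : List (String × String) :=
  (section_dict.foldl (fun d p => PySem.Dict.insert d p.1 (pvCleanB p.2)) PySem.Dict.empty).items

-- ===== PRECONDITION & SPEC =====
def Spec_remove_curly_brackets (section_dict : List (String × String)) (out : List (String × String)) : Prop := out = remove_curly_brackets_alt section_dict
instance (section_dict : List (String × String)) (out : List (String × String)) : Decidable (Spec_remove_curly_brackets section_dict out) := by unfold Spec_remove_curly_brackets; infer_instance

-- ===== CLAIM (what is proved, stated in full; the proofs are below) =====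
def Claim_equal_remove_curly_brackets : Prop := ∀ (section_dict : List (String × String)), Dom_remove_curly_brackets section_dict → Spec_remove_curly_brackets section_dict (remove_curly_brackets section_dict)

-- ===== LEMMAS AND PROOFS =====

-- position one past the last removed range (A's 'prev' seen through to_remove)
def pvEnd (p : Int) : List (Int × Int) → Int
  | [] => p
  | (_, e) :: rs => pvEnd (e + 1) rs

-- the ranges are within bounds, in order and disjoint, starting at or after p
def pvChain (p : Int) : List (Int × Int) → Prop
  | [] => True
  | (s, e) :: rs => p ≤ s ∧ s ≤ e ∧ pvChain (e + 1) rs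

-- the kept pieces strictly between the removed ranges, starting at position p
def pvPieces (cs : List Char) (p : Int) : List (Int × Int) → List Char
  | [] => []
  | (s, e) :: rs => (cs.drop p.toNat).take (s - p).toNat ++ pvPieces cs (e + 1) rs

lemma pvEnd_ge (rs : List (Int × Int)) : ∀ p : Int, pvChain p rs → p ≤ pvEnd p rs := by
  induction rs with
  | nil => intro p _; exact le_refl p
  | cons se rs ih =>
    obtain ⟨s, e⟩ := se
    intro p h
    obtain ⟨h1, h2, h3⟩ := h
    have := ih (e + 1) h3
    simp only [pvEnd]; omega

lemma pvEnd_append (rs : List (Int × Int)) (s e : Int) :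
    ∀ p, pvEnd p (rs ++ [(s, e)]) = e + 1 := by
  induction rs with
  | nil => intro p; rfl
  | cons a rs ih => intro p; obtain ⟨a1, a2⟩ := a; simpa [pvEnd] using ih (a2 + 1)

lemma pvChain_append (rs : List (Int × Int)) (s e : Int) :
    ∀ p, pvChain p rs → pvEnd p rs ≤ s → s ≤ e → pvChain p (rs ++ [(s, e)]) := by
  induction rs with
  | nil => intro p _ h1 h2; exact ⟨h1, h2, trivial⟩
  | cons a rs ih =>
    obtain ⟨a1, a2⟩ := a
    intro p h h1 h2
    obtain ⟨c1, c2, c3⟩ := h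
    exact ⟨c1, c2, ih (a2 + 1) c3 h1 h2⟩

lemma pvPieces_append (cs : List Char) (rs : List (Int × Int)) (s e : Int) :
    ∀ p, pvPieces cs p (rs ++ [(s, e)]) =
      pvPieces cs p rs ++ (cs.drop (pvEnd p rs).toNat).take (s - pvEnd p rs).toNat := by
  induction rs with
  | nil => intro p; simp [pvPieces, pvEnd]
  | cons a rs ih =>
    obtain ⟨a1, a2⟩ := a
    intro p
    simp only [List.cons_append, pvPieces, pvEnd, ih (a2 + 1), List.append_assoc]

-- A's reversed deletion loop = kept prefix ++ pieces ++ kept tail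
lemma pvDel (cs : List Char) (rs : List (Int × Int)) :
    ∀ p : Int, 0 ≤ p → pvChain p rs → pvEnd p rs ≤ (cs.length : Int) →
    rs.reverse.foldl
      (fun tl se => PySem.List.slice tl none (some se.1) ++ PySem.List.slice tl (some (se.2 + 1)) none) cs
      = cs.take p.toNat ++ pvPieces cs p rs ++ cs.drop (pvEnd p rs).toNat := by
  induction rs with
  | nil => intro p hp _ _; simp [pvPieces, pvEnd]
  | cons se rs ih =>
    obtain ⟨s, e⟩ := se
    intro p hp hc hb
    obtain ⟨h1, h2, h3⟩ := hc
    have hEnd : pvEnd p ((s, e) :: rs) = pvEnd (e + 1) rs := rfl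
    rw [hEnd] at hb
    have hge : e + 1 ≤ pvEnd (e + 1) rs := pvEnd_ge rs (e + 1) h3
    have heln : (e + 1).toNat ≤ cs.length := by omega
    have hX := ih (e + 1) (by omega) h3 hb
    rw [List.reverse_cons, List.foldl_append, hX]
    simp only [List.foldl_cons, List.foldl_nil]
    have hlen1 : (List.take (e + 1).toNat cs).length = (e + 1).toNat := by
      simp [List.length_take]; omega
    rw [PySem.List.slice_to _ (by omega), PySem.List.slice_from _ (by omega),
      List.append_assoc, List.take_append, List.drop_append, hlen1]
    have e1 : List.take s.toNat (List.take (e + 1).toNat cs) = List.take s.toNat cs := by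
      rw [List.take_take]; congr 1; omega
    have e2 : s.toNat - (e + 1).toNat = 0 := by omega
    have e3 : List.drop (e + 1).toNat (List.take (e + 1).toNat cs) = [] :=
      List.drop_eq_nil_of_le (le_of_eq hlen1)
    rw [e1, e2, e3, Nat.sub_self]
    simp only [List.take_zero, List.drop_zero, List.append_nil, List.nil_append]
    have htk : cs.take p.toNat ++ (cs.drop p.toNat).take (s - p).toNat = cs.take s.toNat := by
      rw [← List.take_add]; congr 1; omega
    simp only [pvPieces, pvEnd]
    rw [← htk]
    simp [List.append_assoc]

-- the coupled invariant between A's scan state and B's pass state at position i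
def pvInv (cs : List Char) (i : Int) (sA : List Int × List (Int × Int))
    (sB : Int × Int × Int × List (List Char)) : Prop :=
  sB.1 = (sA.1.length : Int) ∧
  sB.2.2.1 = pvEnd 0 sA.2 ∧
  0 ≤ sB.2.2.1 ∧ sB.2.2.1 ≤ i ∧
  pvChain 0 sA.2 ∧
  sB.2.2.2.flatten = pvPieces cs 0 sA.2 ∧
  (∀ x ∈ sA.1, 0 ≤ x ∧ x < i) ∧
  (sA.1 ≠ [] → sA.1.head! = sB.2.1 ∧ sB.2.2.1 ≤ sB.2.1)

lemma pvStep_inv (cs : List Char) (i : Int) (sA : List Int × List (Int × Int))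
    (sB : Int × Int × Int × List (List Char)) (c : Char) (h : pvInv cs i sA sB) :
    pvInv cs (i + 1) (pvStepA sA (i, c)) (pvStepB cs sB (i, c)) := by
  obtain ⟨stack, rem⟩ := sA
  obtain ⟨depth, top, prev, pieces⟩ := sB
  obtain ⟨hlen, hprev, hp0, hpi, hch, hpieces, hmem, hhead⟩ := h
  simp only at hlen hprev hp0 hpi hch hpieces hmem hhead
  by_cases hc1 : c = '{'
  · have hA : pvStepA (stack, rem) (i, c) = (stack ++ [i], rem) := by
      simp [pvStepA, hc1]
    have hB : pvStepB cs (depth, top, prev, pieces) (i, c) =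
        (depth + 1, if depth = 0 then i else top, prev, pieces) := by
      simp [pvStepB, hc1]
    rw [hA, hB]
    refine ⟨?_, hprev, hp0, by show prev ≤ i + 1; omega, hch, hpieces, ?_, ?_⟩
    · show depth + 1 = ((stack ++ [i]).length : Int)
      rw [hlen]; simp
    · intro x hx
      rcases List.mem_append.mp hx with hx | hx
      · have := hmem x hx; omega
      · simp only [List.mem_singleton] at hx; subst hx; omega
    · intro _
      cases stack with
      | nil =>
        have hd0 : depth = 0 := by simpa using hlen
        simp only [List.nil_append, hd0, ite_true]
        exact ⟨rfl, by omega⟩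
      | cons a t =>
        have hdne : ¬ depth = 0 := by
          have : (a :: t).length = t.length + 1 := by simp
          omega
        have hh := hhead (by simp)
        simp only [List.cons_append, if_neg hdne]
        exact ⟨hh.1, hh.2⟩
  · by_cases hc2 : c = '}'
    · cases stack with
      | nil =>
        have hd0 : depth = 0 := by simpa using hlen
        have hA : pvStepA ([], rem) (i, c) = ([], rem) := by
          simp [pvStepA, hc2]
        have hB : pvStepB cs (depth, top, prev, pieces) (i, c) = (depth, top, prev, pieces) := by
          simp [pvStepB, hc2, hd0]
        rw [hA, hB]
        exact ⟨hlen, hprev, hp0, by show prev ≤ i + 1; omega, hch, hpieces, by simp, by simp⟩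
      | cons a t =>
        have hh := hhead (by simp)
        have hhd : (a :: t).head! = a := rfl
        rw [hhd] at hh
        have hma := hmem a (by simp)
        cases t with
        | nil =>
          have hd1 : depth = 1 := by simpa using hlen
          have hA : pvStepA ([a], rem) (i, c) = ([], rem ++ [(a, i)]) := by
            simp [pvStepA, hc2]
          have hB : pvStepB cs (depth, top, prev, pieces) (i, c) =
              (0, top, i + 1, pieces ++ [PySem.List.slice cs (some prev) (some top)]) := by
            simp [pvStepB, hc2, hd1]
          rw [hA, hB]
          refine ⟨by simp, ?_, by show (0 : Int) ≤ i + 1; omega,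
            by show i + 1 ≤ i + 1; omega, ?_, ?_, by simp, by simp⟩
          · show i + 1 = pvEnd 0 (rem ++ [(a, i)])
            rw [pvEnd_append]
          · exact pvChain_append rem a i 0 hch (by omega) (by omega)
          · show (pieces ++ [PySem.List.slice cs (some prev) (some top)]).flatten =
              pvPieces cs 0 (rem ++ [(a, i)])
            rw [pvPieces_append, ← hprev, PySem.List.slice_toNat _ hp0 (by omega)]
            have hto : (a - prev).toNat = top.toNat - prev.toNat := by omega
            simp [hpieces, hto]
        | cons b t' =>
          have hl : (a :: b :: t').length = t'.length + 2 := by simp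
          have hdne : ¬ depth = 0 := by omega
          have hd1ne : ¬ depth - 1 = 0 := by omega
          have hdl : (a :: b :: t').dropLast = a :: (b :: t').dropLast := rfl
          have hdlne : (a :: b :: t').dropLast ≠ [] := by simp [hdl]
          have hA : pvStepA (a :: b :: t', rem) (i, c) = ((a :: b :: t').dropLast, rem) := by
            simp [pvStepA, hc2]
          have hB : pvStepB cs (depth, top, prev, pieces) (i, c) =
              (depth - 1, top, prev, pieces) := by
            simp [pvStepB, hc2, hdne, hd1ne]
          rw [hA, hB]
          refine ⟨?_, hprev, hp0, by show prev ≤ i + 1; omega, hch, hpieces, ?_, ?_⟩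
          · show depth - 1 = ((a :: b :: t').dropLast.length : Int)
            rw [List.length_dropLast]
            omega
          · intro x hx
            have := hmem x (List.dropLast_sublist _ |>.mem hx)
            omega
          · intro _
            rw [hdl]
            exact ⟨hh.1, hh.2⟩
    · have hA : pvStepA (stack, rem) (i, c) = (stack, rem) := by
        simp [pvStepA, hc1, hc2]
      have hB : pvStepB cs (depth, top, prev, pieces) (i, c) = (depth, top, prev, pieces) := by
        simp [pvStepB, hc1, hc2]
      rw [hA, hB]
      refine ⟨hlen, hprev, hp0, by show prev ≤ i + 1; omega, hch, hpieces, ?_, hhead⟩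
      intro x hx; have := hmem x hx; omega

lemma pvScan (cs : List Char) (l : List Char) :
    ∀ (i : Int) sA sB, pvInv cs i sA sB →
    pvInv cs (i + l.length)
      ((PySem.List.enumerate l i).foldl pvStepA sA)
      ((PySem.List.enumerate l i).foldl (pvStepB cs) sB) := by
  induction l with
  | nil => intro i sA sB h; simpa [PySem.List.enumerate_nil] using h
  | cons c l ih =>
    intro i sA sB h
    rw [PySem.List.enumerate_cons]
    simp only [List.foldl_cons]
    have h2 := ih (i + 1) _ _ (pvStep_inv cs i sA sB c h)
    have he : i + ((c :: l).length : Int) = i + 1 + l.length := by push_cast [List.length_cons]; ring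
    rw [he]
    exact h2

lemma pvClean_eq (text : String) : pvCleanA text = pvCleanB text := by
  simp only [pvCleanA, pvCleanB]
  have h0 : pvInv text.toList 0 ([], []) (0, 0, 0, []) :=
    ⟨rfl, rfl, le_refl 0, le_refl 0, trivial, rfl, by simp, by simp⟩
  have h := pvScan text.toList text.toList 0 ([], []) (0, 0, 0, []) h0
  obtain ⟨h1, h2, h3, h4, h5, h6, h7, h8⟩ := h
  congr 1
  rw [pvDel text.toList _ 0 le_rfl h5 (by rw [← h2]; simpa using h4)]
  rw [List.flatten_append, PySem.List.slice_from _ h3, h6, h2]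
  simp

theorem pvOuter_eq (section_dict : List (String × String)) :
    remove_curly_brackets section_dict = remove_curly_brackets_alt section_dict := by
  unfold remove_curly_brackets remove_curly_brackets_alt
  have : pvCleanA = pvCleanB := funext pvClean_eq
  rw [this]

-- ===== VERDICT (by name: the statement is the Claim_ definition above) =====
theorem remove_curly_brackets_spec : Claim_equal_remove_curly_brackets := by
  intro sd _
  unfold Spec_remove_curly_brackets
  exact pvOuter_eq sd
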